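-- pv_equiv track=rewrite | github.com/bernardcooke53/python-semantic-release | tests/helper.py | diff_strings
-- ===== SOURCE A (Python) =====
-- from itertools import zip_longest
-- from typing import List, Optional, Tuple
--
-- def diff_strings(
--     str_a: str, str_b: str
-- ) -> Tuple[List[Tuple[int, str]], List[Tuple[int, str]]]:
--     deleted = []
--     added = []
--     for pos, (left, right) in enumerate(zip_longest(str_a, str_b, fillvalue=None)):
--         if left == right:
--             continue
--         if left is not None:
--             deleted.append((pos, left))
--         if right is not None:
--             added.append((pos, right))
--     return deleted, added
-- ===== SOURCE B (Python) =====
-- def diff_strings(str_a, str_b):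
--     deleted = [(i, c) for i, c in enumerate(str_a) if i >= len(str_b) or str_b[i] != c]
--     added = [(i, c) for i, c in enumerate(str_b) if i >= len(str_a) or str_a[i] != c]
--     return deleted, added
-- ===== Notes on version B (the rewrite author's own statement) =====
-- stated objective: alternative
-- what changed: Replaces the single simultaneous zip_longest loop carrying two accumulators with two independent index-based comprehension passes, one per string, each guarded by the other string's length.
import Mathlib
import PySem

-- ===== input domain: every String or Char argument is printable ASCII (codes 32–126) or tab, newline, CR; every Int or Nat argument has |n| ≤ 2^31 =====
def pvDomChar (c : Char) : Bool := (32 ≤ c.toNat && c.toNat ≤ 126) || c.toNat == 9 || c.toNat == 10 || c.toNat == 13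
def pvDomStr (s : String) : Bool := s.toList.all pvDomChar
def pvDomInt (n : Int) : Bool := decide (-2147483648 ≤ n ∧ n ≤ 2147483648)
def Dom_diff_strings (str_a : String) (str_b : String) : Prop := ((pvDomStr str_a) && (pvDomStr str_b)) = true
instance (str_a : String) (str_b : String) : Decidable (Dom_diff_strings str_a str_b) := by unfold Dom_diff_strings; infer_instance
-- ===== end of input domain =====

-- B replaces A's single zip_longest loop with two independent per-string index passes (alternative decomposition, same cost).

-- ===== PORT A =====
-- the zip_longest loop: pos counts up, left/right are none once a string is exhausted
def diffGoA (pos : Int) (la lb : List Char) :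
    (List (Int × String)) × (List (Int × String)) :=
  match la, lb with
  | [], [] => ([], [])
  | l :: ls, [] =>
      let t := diffGoA (pos + 1) ls []
      ((pos, String.mk [l]) :: t.1, t.2)
  | [], r :: rs =>
      let t := diffGoA (pos + 1) [] rs
      (t.1, (pos, String.mk [r]) :: t.2)
  | l :: ls, r :: rs =>
      let t := diffGoA (pos + 1) ls rs
      if l = r then t
      else ((pos, String.mk [l]) :: t.1, (pos, String.mk [r]) :: t.2)
  termination_by la.length + lb.length

def diff_strings (str_a : String) (str_b : String) :
    (List (Int × String)) × (List (Int × String)) :=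
  diffGoA 0 str_a.toList str_b.toList

-- ===== PORT B =====
-- one pass: keep (i, c) iff i >= len(other) or other[i] != c; lookup none iff i >= len (i ≥ 0 here)
def diffChk (other : List Char) (ic : Int × Char) : Option (Int × String) :=
  match other[ic.1.toNat]? with
  | some d => if ic.2 = d then none else some (ic.1, String.mk [ic.2])
  | none => some (ic.1, String.mk [ic.2])

def diff_strings_alt (str_a : String) (str_b : String) :
    (List (Int × String)) × (List (Int × String)) :=
  let la := str_a.toList
  let lb := str_b.toList
  ((PySem.List.enumerate la 0).filterMap (diffChk lb),
   (PySem.List.enumerate lb 0).filterMap (diffChk la))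

-- ===== PRECONDITION & SPEC =====
def Spec_diff_strings (str_a : String) (str_b : String) (out : (List (Int × String)) × (List (Int × String))) : Prop := out = diff_strings_alt str_a str_b
instance (str_a : String) (str_b : String) (out : (List (Int × String)) × (List (Int × String))) : Decidable (Spec_diff_strings str_a str_b out) := by unfold Spec_diff_strings; infer_instance

-- ===== CLAIM (what is proved, stated in full; the proofs are below) =====
def Claim_equal_diff_strings : Prop := ∀ (str_a : String) (str_b : String), Dom_diff_strings str_a str_b → Spec_diff_strings str_a str_b (diff_strings str_a str_b)

-- ===== LEMMAS AND PROOFS =====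

lemma diffGoA_eq (lafull lbfull : List Char) :
    ∀ (n s : Nat) (la lb : List Char), la.length + lb.length ≤ n →
      la = lafull.drop s → lb = lbfull.drop s →
      diffGoA (s : Int) la lb =
        ((PySem.List.enumerate la (s : Int)).filterMap (diffChk lbfull),
         (PySem.List.enumerate lb (s : Int)).filterMap (diffChk lafull)) := by
  intro n
  induction n with
  | zero =>
      intro s la lb hn ha hb
      clear ha hb
      cases la <;> cases lb <;> simp_all [diffGoA, PySem.List.enumerate]
  | succ n ih =>
      intro s la lb hn ha hb
      have hsa : lafull.drop (s + 1) = la.tail := by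
        rw [← List.drop_drop, ← ha]; cases la <;> simp
      have hsb : lbfull.drop (s + 1) = lb.tail := by
        rw [← List.drop_drop, ← hb]; cases lb <;> simp
      have hga : lafull[s]? = la[0]? := by
        rw [ha]; simp [List.getElem?_drop]
      have hgb : lbfull[s]? = lb[0]? := by
        rw [hb]; simp [List.getElem?_drop]
      match la, lb with
      | [], [] => simp [diffGoA, PySem.List.enumerate]
      | l :: ls, [] =>
          have hrec := ih (s + 1) ls [] (by simp at hn ⊢; omega)
            (by simpa using hsa.symm) (by simpa using hsb.symm)
          simp only [diffGoA, PySem.List.enumerate_cons, PySem.List.enumerate_nil,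
            List.filterMap_cons, List.filterMap_nil]
          rw [show ((s : Int) + 1) = ((s + 1 : Nat) : Int) by push_cast; ring, hrec]
          simp only [diffChk, Int.toNat_natCast]
          rw [hgb]
          simp [PySem.List.enumerate]
      | [], r :: rs =>
          have hrec := ih (s + 1) [] rs (by simp at hn ⊢; omega)
            (by simpa using hsa.symm) (by simpa using hsb.symm)
          simp only [diffGoA, PySem.List.enumerate_cons, PySem.List.enumerate_nil,
            List.filterMap_cons, List.filterMap_nil]
          rw [show ((s : Int) + 1) = ((s + 1 : Nat) : Int) by push_cast; ring, hrec]
          simp only [diffChk, Int.toNat_natCast]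
          rw [hga]
          simp [PySem.List.enumerate]
      | l :: ls, r :: rs =>
          have hrec := ih (s + 1) ls rs (by simp at hn ⊢; omega)
            (by simpa using hsa.symm) (by simpa using hsb.symm)
          simp only [diffGoA, PySem.List.enumerate_cons, List.filterMap_cons]
          rw [show ((s : Int) + 1) = ((s + 1 : Nat) : Int) by push_cast; ring, hrec]
          simp only [diffChk, Int.toNat_natCast]
          rw [hga, hgb]
          simp only [List.getElem?_cons_zero]
          by_cases h : l = r
          · subst h; simp
          · have h' : ¬ r = l := fun hh => h hh.symm
            simp [h, h']

-- ===== VERDICT (by name: the statement is the Claim_ definition above) =====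
theorem diff_strings_spec : Claim_equal_diff_strings := by
  intro str_a str_b _
  unfold Spec_diff_strings diff_strings diff_strings_alt
  have h := diffGoA_eq str_a.toList str_b.toList
    (str_a.toList.length + str_b.toList.length) 0
    str_a.toList str_b.toList (le_refl _) (by simp) (by simp)
  simpa using h
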